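-- pv_equiv track=rewrite | github.com/Omar-khaiom/web_apps_project | app.py | _map_dietary_prefs_to_api_params
-- ===== SOURCE A (Python) =====
-- def _map_dietary_prefs_to_api_params(dietary_prefs):
--     """
--     Map form values to Spoonacular complexSearch params.
--     - diet: supports 'vegetarian', 'vegan', 'gluten free', etc.
--     - intolerances: supports 'dairy', 'gluten', 'peanut', etc.
--     We handle the common ones from your UI.
--     """
--     if not dietary_prefs:
--         return None, None
--
--     diets = []
--     intolerances = []
--
--     for pref in dietary_prefs:
--         p = pref.strip().lower()
--         if p == "vegetarian":
--             diets.append("vegetarian")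
--         elif p == "vegan":
--             diets.append("vegan")
--         elif p == "gluten free":
--             diets.append("gluten free")
--         elif p == "dairy free":
--             intolerances.append("dairy")
--         # add more mappings if your UI has more options
--
--     # De-duplicate
--     diets = list(dict.fromkeys(diets))
--     intolerances = list(dict.fromkeys(intolerances))
--
--     diet_param = ",".join(diets) if diets else None
--     intolerance_param = ",".join(intolerances) if intolerances else None
--     return diet_param, intolerance_param
-- ===== SOURCE B (Python) =====
-- def _map_dietary_prefs_to_api_params(dietary_prefs):
--     if not dietary_prefs:
--         return None, None
--     normed = [p.strip().lower() for p in dietary_prefs]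
--     diets = sorted((d for d in ("vegetarian", "vegan", "gluten free") if d in normed),
--                    key=normed.index)
--     diet_param = ",".join(diets) if diets else None
--     intolerance_param = "dairy" if "dairy free" in normed else None
--     return diet_param, intolerance_param
-- ===== Notes on version B (the rewrite author's own statement) =====
-- stated objective: alternative
-- what changed: Instead of A's element-driven pass that classifies each pref into two accumulator lists and deduplicates each afterwards, B is candidate-driven: it normalizes the input once, selects which of the three fixed diet keys occur at all, orders them by their first-occurrence index with sorted(key=normed.index), and answers the single intolerance by a plain membership test - no accumulators and no deduplication step.
import Mathlib
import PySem

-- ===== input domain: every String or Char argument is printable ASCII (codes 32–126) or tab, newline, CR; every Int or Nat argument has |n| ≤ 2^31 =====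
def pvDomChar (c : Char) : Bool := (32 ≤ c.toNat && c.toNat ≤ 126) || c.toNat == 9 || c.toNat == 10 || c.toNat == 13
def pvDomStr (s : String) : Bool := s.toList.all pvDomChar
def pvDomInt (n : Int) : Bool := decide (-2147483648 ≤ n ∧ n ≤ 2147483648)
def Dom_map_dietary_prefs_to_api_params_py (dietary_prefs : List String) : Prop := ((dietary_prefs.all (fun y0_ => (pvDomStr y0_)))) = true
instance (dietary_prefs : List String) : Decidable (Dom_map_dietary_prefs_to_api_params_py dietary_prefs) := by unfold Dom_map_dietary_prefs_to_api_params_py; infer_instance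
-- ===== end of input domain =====

-- B replaces A's element-driven classify-append-dedup pass by a candidate-driven computation:
-- which of the three fixed diet keys occur, ordered by first-occurrence index via sorted(key=index),
-- and a plain membership test for the single intolerance — same cost, a different algorithm.

-- ===== PORT A =====
def map_dietary_prefs_to_api_params_py (dietary_prefs : List String) : Option String × Option String :=
  if dietary_prefs.isEmpty then (none, none)
  else
    let st := dietary_prefs.foldl (fun (st : List String × List String) pref =>
      let p := PySem.Str.lower (PySem.Str.strip pref)
      if p == "vegetarian" then (st.1 ++ ["vegetarian"], st.2)
      else if p == "vegan" then (st.1 ++ ["vegan"], st.2)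
      else if p == "gluten free" then (st.1 ++ ["gluten free"], st.2)
      else if p == "dairy free" then (st.1, st.2 ++ ["dairy"])
      else st) ([], [])
    let diets := PySem.List.dedup st.1
    let intolerances := PySem.List.dedup st.2
    (if diets.isEmpty then none else some (PySem.Str.join "," diets),
     if intolerances.isEmpty then none else some (PySem.Str.join "," intolerances))

-- ===== PORT B =====
def map_dietary_prefs_to_api_params_py_alt (dietary_prefs : List String) : Option String × Option String :=
  if dietary_prefs.isEmpty then (none, none)
  else
    let normed := dietary_prefs.map (fun p => PySem.Str.lower (PySem.Str.strip p))
    -- sorted(..., key=normed.index): the generator admits only members of normed, so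
    -- Python's normed.index(d) is exactly (index? normed d).getD 0 on every sorted element
    let diets := PySem.List.sorted
      ((["vegetarian", "vegan", "gluten free"]).filter (fun d => normed.contains d))
      (fun d => (PySem.List.index? normed d).getD 0) false
    (if diets.isEmpty then none else some (PySem.Str.join "," diets),
     if normed.contains "dairy free" then some "dairy" else none)

-- ===== PRECONDITION & SPEC =====
def Spec_map_dietary_prefs_to_api_params_py (dietary_prefs : List String) (out : Option String × Option String) : Prop := out = map_dietary_prefs_to_api_params_py_alt dietary_prefs
instance (dietary_prefs : List String) (out : Option String × Option String) : Decidable (Spec_map_dietary_prefs_to_api_params_py dietary_prefs out) := by unfold Spec_map_dietary_prefs_to_api_params_py; infer_instance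

-- ===== CLAIM (what is proved, stated in full; the proofs are below) =====
def Claim_equal_map_dietary_prefs_to_api_params_py : Prop := ∀ (dietary_prefs : List String), Dom_map_dietary_prefs_to_api_params_py dietary_prefs → Spec_map_dietary_prefs_to_api_params_py dietary_prefs (map_dietary_prefs_to_api_params_py dietary_prefs)

-- ===== LEMMAS AND PROOFS =====

def pvIsDiet (p : String) : Bool := p == "vegetarian" || p == "vegan" || p == "gluten free"

-- A's two-accumulator fold, characterized as two filters over the normalized list
theorem foldA_eq (prefs : List String) (d0 i0 : List String) :
    prefs.foldl (fun (st : List String × List String) pref =>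
      let p := PySem.Str.lower (PySem.Str.strip pref)
      if p == "vegetarian" then (st.1 ++ ["vegetarian"], st.2)
      else if p == "vegan" then (st.1 ++ ["vegan"], st.2)
      else if p == "gluten free" then (st.1 ++ ["gluten free"], st.2)
      else if p == "dairy free" then (st.1, st.2 ++ ["dairy"])
      else st) (d0, i0)
    = (d0 ++ (prefs.map (fun p => PySem.Str.lower (PySem.Str.strip p))).filter pvIsDiet,
       i0 ++ ((prefs.map (fun p => PySem.Str.lower (PySem.Str.strip p))).filter
          (fun p => p == "dairy free")).map (fun _ => "dairy")) := by
  induction prefs generalizing d0 i0 with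
  | nil => simp
  | cons pref rest ih =>
    simp only [List.foldl_cons, List.map_cons, List.filter_cons]
    by_cases h1 : PySem.Str.lower (PySem.Str.strip pref) == "vegetarian"
    · have e := eq_of_beq h1
      simp only [e, ih, pvIsDiet]
      simp [List.append_assoc]
    · by_cases h2 : PySem.Str.lower (PySem.Str.strip pref) == "vegan"
      · have e := eq_of_beq h2
        simp only [e, ih, pvIsDiet]
        simp [List.append_assoc]
      · by_cases h3 : PySem.Str.lower (PySem.Str.strip pref) == "gluten free"
        · have e := eq_of_beq h3
          simp only [e, ih, pvIsDiet]
          simp [List.append_assoc]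
        · by_cases h4 : PySem.Str.lower (PySem.Str.strip pref) == "dairy free"
          · have e := eq_of_beq h4
            simp only [e, ih, pvIsDiet]
            simp [List.append_assoc]
          · have hd : pvIsDiet (PySem.Str.lower (PySem.Str.strip pref)) = false := by
              simp only [pvIsDiet]
              simp only [Bool.eq_false_iff] at h1 h2 h3 ⊢
              simp [h1, h2, h3]
            simp only [h1, h2, h3, h4, if_neg, Bool.false_eq_true, not_false_eq_true, ih, hd]

-- first-occurrence dedup (Set.ofList) commutes with filter
theorem foldl_add_filter {α : Type} [BEq α] [LawfulBEq α] (p : α → Bool) (l s : List α) :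
    (l.foldl PySem.Set.add s).filter p = (l.filter p).foldl PySem.Set.add (s.filter p) := by
  induction l generalizing s with
  | nil => simp
  | cons x l ih =>
    simp only [List.foldl_cons, List.filter_cons]
    by_cases hp : p x
    · simp only [hp, if_pos, List.foldl_cons]
      rw [ih]
      congr 1
      simp only [PySem.Set.add, PySem.Set.contains, List.contains_iff_mem]
      by_cases hm : x ∈ s
      · simp [hm, List.mem_filter, hp]
      · simp [hm, List.mem_filter, List.filter_append, hp]
    · simp only [hp, Bool.false_eq_true, if_neg, not_false_eq_true]
      rw [ih]
      congr 1
      simp only [PySem.Set.add, PySem.Set.contains, List.contains_iff_mem]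
      by_cases hm : x ∈ s
      · simp [hm]
      · simp [hm, List.filter_append, hp]

-- elements of a first-occurrence dedup are ordered by their first index in the source list
theorem pairwise_key_dedup (l : List String) :
    (PySem.List.dedup l).Pairwise
      (fun a b => (PySem.List.index? l a).getD 0 < (PySem.List.index? l b).getD 0) := by
  induction l using List.reverseRecOn with
  | nil => simp [PySem.List.dedup, PySem.Set.ofList, PySem.Set.empty]
  | append_singleton l x ih =>
    have hstep : PySem.List.dedup (l ++ [x]) = PySem.Set.add (PySem.List.dedup l) x := by
      simp [PySem.List.dedup, PySem.Set.ofList]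
    have hded : PySem.List.dedup (l ++ [x])
        = if x ∈ l then PySem.List.dedup l else PySem.List.dedup l ++ [x] := by
      rw [hstep]
      by_cases hm : x ∈ l
      · rw [if_pos hm]
        simp [PySem.Set.add, PySem.Set.contains, hm]
      · rw [if_neg hm]
        simp [PySem.Set.add, PySem.Set.contains, hm]
    by_cases hm : x ∈ l
    · rw [hded, if_pos hm]
      refine ih.imp_of_mem ?_
      intro a b ha hb hab
      have ha' : a ∈ l := (PySem.List.mem_dedup _ _).mp ha
      have hb' : b ∈ l := (PySem.List.mem_dedup _ _).mp hb
      rwa [PySem.List.index?_append_of_mem _ ha', PySem.List.index?_append_of_mem _ hb']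
    · rw [hded, if_neg hm]
      rw [List.pairwise_append]
      refine ⟨ih.imp_of_mem ?_, by simp, ?_⟩
      · intro a b ha hb hab
        have ha' : a ∈ l := (PySem.List.mem_dedup _ _).mp ha
        have hb' : b ∈ l := (PySem.List.mem_dedup _ _).mp hb
        rwa [PySem.List.index?_append_of_mem _ ha', PySem.List.index?_append_of_mem _ hb']
      · intro a ha b hb
        have hb' : b = x := by simpa using hb
        have ha' : a ∈ l := (PySem.List.mem_dedup _ _).mp ha
        subst hb'
        rw [PySem.List.index?_append_of_mem _ ha', PySem.List.index?_append_singleton_self l _ hm]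
        have hsome : (PySem.List.index? l a).isSome := (PySem.List.index?_isSome_iff _ _).mpr ha'
        obtain ⟨k, hk⟩ := Option.isSome_iff_exists.mp hsome
        obtain ⟨hlt, -, -⟩ := PySem.List.getElem_of_index?_eq_some hk
        rw [PySem.List.index?_eq_idxOf?] at hk
        simp [hk, hlt]

-- the deduped diet stream IS the candidate list sorted by first-occurrence index
theorem diets_eq (normed : List String) :
    PySem.List.sorted ((["vegetarian", "vegan", "gluten free"]).filter (fun d => normed.contains d))
      (fun d => (PySem.List.index? normed d).getD 0) false
    = PySem.List.dedup (normed.filter pvIsDiet) := by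
  have hdf : PySem.List.dedup (normed.filter pvIsDiet)
      = (PySem.List.dedup normed).filter pvIsDiet := by
    simp only [PySem.List.dedup, PySem.Set.ofList]
    rw [foldl_add_filter]
    simp [PySem.Set.empty]
  apply PySem.List.sorted_eq_of_perm_of_pairwise_lt
  · -- permutation: both are nodup with the same members
    apply (List.perm_ext_iff_of_nodup ?_ ?_).mpr
    · intro a
      rw [hdf]
      simp only [List.mem_filter, PySem.List.mem_dedup, List.contains_iff_mem, pvIsDiet,
        Bool.or_eq_true, beq_iff_eq, List.mem_cons, List.not_mem_nil, or_false]
      tauto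
    · rw [hdf]; exact (PySem.List.nodup_dedup normed).filter _
    · exact (by decide : (["vegetarian", "vegan", "gluten free"] : List String).Nodup).filter _
  · -- strictly increasing first-occurrence indexes
    rw [hdf]
    exact (pairwise_key_dedup normed).sublist List.filter_sublist

-- a nonempty constant list dedups to the singleton
theorem dedup_map_const (c : String) (l : List String) (h : l ≠ []) :
    PySem.List.dedup (l.map (fun _ => c)) = [c] := by
  cases l with
  | nil => exact absurd rfl h
  | cons x t =>
    simp only [List.map_cons, PySem.List.dedup, PySem.Set.ofList, List.foldl_cons]
    have h0 : PySem.Set.add PySem.Set.empty c = [c] := by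
      simp [PySem.Set.add, PySem.Set.empty]
    rw [h0]
    induction t with
    | nil => simp
    | cons y t ih =>
      simp only [List.map_cons, List.foldl_cons]
      have : PySem.Set.add [c] c = [c] := by simp [PySem.Set.add, PySem.Set.contains]
      rw [this]
      exact ih (by simp)

-- ===== VERDICT (by name: the statement is the Claim_ definition above) =====
theorem map_dietary_prefs_to_api_params_py_spec : Claim_equal_map_dietary_prefs_to_api_params_py := by
  intro prefs _
  unfold Spec_map_dietary_prefs_to_api_params_py
  unfold map_dietary_prefs_to_api_params_py map_dietary_prefs_to_api_params_py_alt
  by_cases h : prefs.isEmpty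
  · simp [h]
  · simp only [h, if_neg, Bool.false_eq_true, not_false_eq_true]
    rw [foldA_eq]
    simp only [List.nil_append]
    rw [diets_eq]
    congr 1
    by_cases hd : "dairy free" ∈ prefs.map (fun p => PySem.Str.lower (PySem.Str.strip p))
    · have hne : (prefs.map (fun p => PySem.Str.lower (PySem.Str.strip p))).filter
          (fun p => p == "dairy free") ≠ [] := by
        simp only [ne_eq, List.filter_eq_nil_iff, not_forall]
        exact ⟨"dairy free", hd, by simp⟩
      rw [dedup_map_const _ _ hne]
      simp [hd]
      decide
    · have hnil : (prefs.map (fun p => PySem.Str.lower (PySem.Str.strip p))).filter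
          (fun p => p == "dairy free") = [] := by
        simp only [List.filter_eq_nil_iff]
        intro a ha hba
        exact hd (eq_of_beq hba ▸ ha)
      rw [hnil]
      simp [hd, PySem.List.dedup, PySem.Set.ofList, PySem.Set.empty]
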